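-- pv_equiv track=rewrite | github.com/okku0916/Rubiks-Cube-Solver | preparation_tpa.py | orientation_to_index
-- ===== SOURCE A (Python) =====
-- def orientation_to_index(ori, is_edge):
--     index = 0
--     for i in ori[:-1]: # 最後は他が決まれば一意に決まるから除外
--         if is_edge: # エッジの向きは0,1の２種類なので2進数で表現
--             index *= 2
--         else: # コーナーの向きは0,1,2の３種類なので3進数で表現
--             index *= 3
--         index += i
--     return index
-- ===== SOURCE B (Python) =====
-- def orientation_to_index(ori, is_edge):
--     # positional weighting, built back-to-front: a running place value p is
--     # multiplied up while each digit contributes d * p independently to the sum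
--     base = 2 if is_edge else 3
--     index = 0
--     p = 1
--     for d in reversed(ori[:-1]):
--         index += d * p
--         p *= base
--     return index
-- ===== Notes on version B (the rewrite author's own statement) =====
-- stated objective: alternative
-- what changed: Replaces the Horner-style running accumulator (index = index*base + digit) with positional weighting built back-to-front: iterate the digits in reverse keeping a running place value p, adding digit*p for each and multiplying p by the base.
import Mathlib
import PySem

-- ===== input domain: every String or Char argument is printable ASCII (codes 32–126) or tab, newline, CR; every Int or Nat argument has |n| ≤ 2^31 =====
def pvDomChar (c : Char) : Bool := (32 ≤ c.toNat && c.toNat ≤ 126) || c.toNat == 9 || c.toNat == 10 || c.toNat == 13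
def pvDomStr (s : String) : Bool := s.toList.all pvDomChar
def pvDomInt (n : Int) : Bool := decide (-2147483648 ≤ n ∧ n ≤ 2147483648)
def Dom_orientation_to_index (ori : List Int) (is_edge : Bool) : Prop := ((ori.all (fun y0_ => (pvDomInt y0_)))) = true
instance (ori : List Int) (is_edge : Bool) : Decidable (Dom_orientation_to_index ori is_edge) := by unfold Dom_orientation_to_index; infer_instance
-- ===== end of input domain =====

-- B replaces A's Horner accumulator with a back-to-front positional-weight sum keeping a running place value (alternative decomposition, same cost).

-- ===== PORT A =====
def orientation_to_index (ori : List Int) (is_edge : Bool) : Int :=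
  (PySem.List.slice ori none (some (-1))).foldl
    (fun index i => (if is_edge then index * 2 else index * 3) + i) 0

-- ===== PORT B =====
def orientation_to_index_alt (ori : List Int) (is_edge : Bool) : Int :=
  let base : Int := if is_edge then 2 else 3
  ((PySem.List.slice ori none (some (-1))).reverse.foldl
    (fun (s : Int × Int) d => (s.1 + d * s.2, s.2 * base)) (0, 1)).1

-- ===== PRECONDITION & SPEC =====
def Spec_orientation_to_index (ori : List Int) (is_edge : Bool) (out : Int) : Prop := out = orientation_to_index_alt ori is_edge
instance (ori : List Int) (is_edge : Bool) (out : Int) : Decidable (Spec_orientation_to_index ori is_edge out) := by unfold Spec_orientation_to_index; infer_instance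

-- ===== CLAIM (what is proved, stated in full; the proofs are below) =====
def Claim_equal_orientation_to_index : Prop := ∀ (ori : List Int) (is_edge : Bool), Dom_orientation_to_index ori is_edge → Spec_orientation_to_index ori is_edge (orientation_to_index ori is_edge)

-- ===== LEMMAS AND PROOFS =====

-- the second component of B's state is the running place value b ^ length
theorem snd_weight_fold (b : Int) (xs : List Int) :
    (xs.foldr (fun d (s : Int × Int) => (s.1 + d * s.2, s.2 * b)) (0, 1)).2
      = b ^ xs.length := by
  induction xs with
  | nil => simp
  | cons d t ih =>
    rw [List.foldr_cons]
    simp only []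
    rw [ih, List.length_cons, pow_succ]

-- A's Horner fold equals the place-value sum collected by B's fold
theorem horner_eq_weight_fold (b : Int) (xs : List Int) (acc : Int) :
    xs.foldl (fun a d => a * b + d) acc
      = acc * b ^ xs.length
        + (xs.foldr (fun d (s : Int × Int) => (s.1 + d * s.2, s.2 * b)) (0, 1)).1 := by
  induction xs generalizing acc with
  | nil => simp
  | cons d t ih =>
    rw [List.foldl_cons, ih, List.foldr_cons]
    simp only [List.length_cons]
    rw [snd_weight_fold, pow_succ]
    ring

-- ===== VERDICT (by name: the statement is the Claim_ definition above) =====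
theorem orientation_to_index_spec : Claim_equal_orientation_to_index := by
  intro ori is_edge _
  unfold Spec_orientation_to_index orientation_to_index orientation_to_index_alt
  set b : Int := if is_edge then 2 else 3 with hb
  have hfun : (fun (index i : Int) => (if is_edge then index * 2 else index * 3) + i)
      = fun a d => a * b + d := by
    funext a d; cases is_edge <;> simp [hb]
  rw [hfun]
  simp only [List.foldl_reverse]
  rw [horner_eq_weight_fold b _ 0]
  simp
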